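-- pv_equiv track=rewrite | github.com/Alvicorn/MAPF-SIPP | dynamic_env_generator.py | increment_obstacle_id
-- ===== SOURCE A (Python) =====
-- def increment_obstacle_id(s: str) -> str:
--     """
--     Helper function for incrementing to the next obstacle id.
--
--     Args:
--         s (str): Current obstacle id.
--
--     Returns:
--         str: Incremented obstacle id.
--     """
--     result = list(s)
--     i = len(result) - 1
--
--     while i >= 0:
--         if result[i] == "z":
--             result[i] = "a"
--             i -= 1
--         else:
--             result[i] = chr(ord(result[i]) + 1)
--             break
--     else:
--         result.insert(0, "a")
--
--     return "".join(result)
-- ===== SOURCE B (Python) =====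
-- def increment_obstacle_id(s: str) -> str:
--     """Incremented obstacle id: count trailing 'z's, then build the result by slicing."""
--     k = len(s) - len(s.rstrip("z"))
--     if k == len(s):
--         return "a" * (len(s) + 1)
--     p = len(s) - 1 - k
--     return s[:p] + chr(ord(s[p]) + 1) + "a" * k
-- ===== Notes on version B (the rewrite author's own statement) =====
-- stated objective: simpler
-- what changed: Replaces the right-to-left mutate-in-place while/else loop with a count-then-slice construction: count the trailing 'z' run via rstrip, then assemble prefix + incremented pivot char + 'a'-run (or all 'a's on full overflow).
import Mathlib
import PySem

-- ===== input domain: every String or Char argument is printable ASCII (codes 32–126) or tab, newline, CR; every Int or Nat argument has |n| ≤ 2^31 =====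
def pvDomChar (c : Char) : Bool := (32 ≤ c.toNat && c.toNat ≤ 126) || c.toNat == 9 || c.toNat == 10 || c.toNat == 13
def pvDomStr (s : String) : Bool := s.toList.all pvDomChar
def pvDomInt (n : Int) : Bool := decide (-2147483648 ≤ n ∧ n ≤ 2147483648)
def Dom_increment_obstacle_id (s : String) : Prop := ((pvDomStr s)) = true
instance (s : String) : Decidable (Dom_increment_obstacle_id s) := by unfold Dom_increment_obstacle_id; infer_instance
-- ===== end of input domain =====

-- B replaces A's right-to-left mutate-in-place while/else loop by a count-then-slice
-- construction (count the trailing 'z' run, then assemble prefix + bumped pivot + 'a'-run);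
-- objective: simpler.

-- ===== PORT A =====
-- The while-loop walks the reversed list: each 'z' becomes 'a' (Bool records whether `break`
-- was reached); state is (break?, processed reversed result list).
def pvAGo : List Char → Bool × List Char
  | [] => (false, [])
  | c :: rest =>
    if c = 'z' then
      let r := pvAGo rest
      (r.1, 'a' :: r.2)
    else (true, Char.ofNat (c.toNat + 1) :: rest)

def increment_obstacle_id (s : String) : String :=
  let r := pvAGo s.toList.reverse
  if r.1 then String.mk r.2.reverse else String.mk ('a' :: r.2.reverse)

-- ===== PORT B =====
-- k = len(s) - len(s.rstrip('z')) ported as the length of the trailing 'z' run (exact: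
-- rstrip('z') removes exactly that run); slices/indexing via take/getD, p always in range.
def increment_obstacle_id_alt (s : String) : String :=
  let t := s.toList
  let k := (t.reverse.takeWhile (· = 'z')).length
  if k = t.length then String.mk (List.replicate (t.length + 1) 'a')
  else
    let p := t.length - 1 - k
    String.mk (t.take p ++ Char.ofNat ((t.getD p ' ').toNat + 1) :: List.replicate k 'a')

-- ===== PRECONDITION & SPEC =====
def Spec_increment_obstacle_id (s : String) (out : String) : Prop := out = increment_obstacle_id_alt s
instance (s : String) (out : String) : Decidable (Spec_increment_obstacle_id s out) := by unfold Spec_increment_obstacle_id; infer_instance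

-- ===== CLAIM (what is proved, stated in full; the proofs are below) =====
def Claim_equal_increment_obstacle_id : Prop := ∀ (s : String), Dom_increment_obstacle_id s → Spec_increment_obstacle_id s (increment_obstacle_id s)

-- ===== LEMMAS AND PROOFS =====

theorem pvAGo_all_z (l : List Char) (h : ∀ c ∈ l, c = 'z') :
    pvAGo l = (false, List.replicate l.length 'a') := by
  induction l with
  | nil => rfl
  | cons c rest ih =>
    have hc : c = 'z' := h c (by simp)
    simp [pvAGo, hc, ih fun d hd => h d (by simp [hd]), List.replicate_succ]

theorem pvAGo_split (k : ℕ) (c : Char) (rest : List Char) (hc : c ≠ 'z') :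
    pvAGo (List.replicate k 'z' ++ c :: rest)
      = (true, List.replicate k 'a' ++ Char.ofNat (c.toNat + 1) :: rest) := by
  induction k with
  | zero => simp [pvAGo, hc]
  | succ n ih => simp [List.replicate_succ, pvAGo, ih]

theorem takeWhile_rep (l : List Char) :
    l.takeWhile (· = 'z') = List.replicate (l.takeWhile (· = 'z')).length 'z' := by
  rw [List.eq_replicate_iff]
  refine ⟨rfl, fun b hb => ?_⟩
  simpa using List.mem_takeWhile_imp hb

theorem increment_obstacle_id_eq (s : String) :
    increment_obstacle_id s = increment_obstacle_id_alt s := by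
  simp only [increment_obstacle_id, increment_obstacle_id_alt]
  by_cases hall : ∀ c ∈ s.toList.reverse, c = 'z'
  · have hkl : (s.toList.reverse.takeWhile (· = 'z')).length = s.toList.length := by
      rw [List.takeWhile_eq_self_iff.mpr (by simpa using hall)]; simp
    rw [if_pos hkl, pvAGo_all_z _ hall]
    simp [List.replicate_succ]
  · have hne : s.toList.reverse.dropWhile (· = 'z') ≠ [] := by
      intro h0
      apply hall
      intro c hc
      have hsp := List.takeWhile_append_dropWhile (p := fun c => decide (c = 'z'))
        (l := s.toList.reverse)
      rw [h0, List.append_nil] at hsp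
      rw [← hsp] at hc
      simpa using List.mem_takeWhile_imp hc
    obtain ⟨c, rest, hcr⟩ := List.exists_cons_of_ne_nil hne
    have hc : c ≠ 'z' := by
      have hh := List.head?_dropWhile_not (p := fun c => decide (c = 'z'))
        (l := s.toList.reverse)
      rw [hcr] at hh
      simpa using hh
    have hrev : s.toList.reverse
        = List.replicate (s.toList.reverse.takeWhile (· = 'z')).length 'z' ++ c :: rest := by
      conv_lhs => rw [← List.takeWhile_append_dropWhile (p := fun c => decide (c = 'z'))
        (l := s.toList.reverse), hcr]
      congr 1
      exact takeWhile_rep _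
    have hlen : s.toList.length
        = (s.toList.reverse.takeWhile (· = 'z')).length + (rest.length + 1) := by
      have := congrArg List.length hrev
      simpa [Nat.add_comm, Nat.add_left_comm] using this
    have hkne : ¬ (s.toList.reverse.takeWhile (· = 'z')).length = s.toList.length := by omega
    have htt : s.toList = rest.reverse
        ++ c :: List.replicate (s.toList.reverse.takeWhile (· = 'z')).length 'z' := by
      have := congrArg List.reverse hrev
      simpa [List.reverse_replicate] using this
    have hp : s.toList.length - 1 - (s.toList.reverse.takeWhile (· = 'z')).length
        = rest.length := by omega
    have htake : s.toList.take rest.length = rest.reverse := by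
      rw [htt]
      have h1 : rest.length = rest.reverse.length := by simp
      rw [h1, List.take_left]
    have hgetD : s.toList.getD rest.length ' ' = c := by
      rw [htt, List.getD_eq_getElem?_getD, List.getElem?_append_right (by simp)]
      simp
    have hgo : pvAGo s.toList.reverse
        = (true, List.replicate (s.toList.reverse.takeWhile (· = 'z')).length 'a'
            ++ Char.ofNat (c.toNat + 1) :: rest) := by
      conv_lhs => rw [hrev]
      exact pvAGo_split _ _ _ hc
    rw [if_neg hkne, hp, htake, hgo]
    rw [List.getD_eq_getElem?_getD] at hgetD
    simp [hgetD, List.reverse_replicate]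

-- ===== VERDICT (by name: the statement is the Claim_ definition above) =====
theorem increment_obstacle_id_spec : Claim_equal_increment_obstacle_id := by
  intro s _
  unfold Spec_increment_obstacle_id
  exact increment_obstacle_id_eq s
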